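-- pv_equiv track=rewrite | github.com/navapbc/lockpicks-xlator-plugin | xl-plugin/tools/export_test_results.py | split_depth_zero
-- ===== SOURCE A (Python) =====
-- def split_depth_zero(s: str, sep: str) -> list[str]:
--     """Split s on sep only at brace/bracket depth 0."""
--     parts: list[str] = []
--     brace_depth = 0
--     bracket_depth = 0
--     current: list[str] = []
--     sep_len = len(sep)
--     i = 0
--     while i < len(s):
--         if s[i] == '{':
--             brace_depth += 1
--         elif s[i] == '}':
--             brace_depth -= 1
--         elif s[i] == '[':
--             bracket_depth += 1
--         elif s[i] == ']':
--             bracket_depth -= 1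
--         if brace_depth == 0 and bracket_depth == 0 and s[i:i + sep_len] == sep:
--             parts.append(''.join(current))
--             current = []
--             i += sep_len
--             continue
--         current.append(s[i])
--         i += 1
--     if current:
--         parts.append(''.join(current))
--     return parts
-- ===== SOURCE B (Python) =====
-- def split_depth_zero(s: str, sep: str) -> list[str]:
--     """Split s on sep only at brace/bracket depth 0.
--
--     Two passes: first record the cut positions at depth zero, then slice
--     the string along them (dropping a lone empty tail segment)."""
--     sep_len = len(sep)
--     cuts = []
--     brace = 0
--     bracket = 0
--     i = 0
--     n = len(s)
--     while i < n:
--         c = s[i]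
--         if c == '{':
--             brace += 1
--         elif c == '}':
--             brace -= 1
--         elif c == '[':
--             bracket += 1
--         elif c == ']':
--             bracket -= 1
--         if brace == 0 and bracket == 0 and s[i:i + sep_len] == sep:
--             cuts.append(i)
--             i += sep_len
--         else:
--             i += 1
--     parts = []
--     prev = 0
--     for c in cuts:
--         parts.append(s[prev:c])
--         prev = c + sep_len
--     tail = s[prev:]
--     if tail:
--         parts.append(tail)
--     return parts
-- ===== Notes on version B (the rewrite author's own statement) =====
-- stated objective: alternative
-- what changed: B splits the work into two passes: a scan that only records depth-zero cut positions, then a slicing pass that builds the segments directly from the original string (dropping only a lone empty tail), instead of A's single loop that copies characters into a growing 'current' buffer and joins it at each cut.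
import Mathlib
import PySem

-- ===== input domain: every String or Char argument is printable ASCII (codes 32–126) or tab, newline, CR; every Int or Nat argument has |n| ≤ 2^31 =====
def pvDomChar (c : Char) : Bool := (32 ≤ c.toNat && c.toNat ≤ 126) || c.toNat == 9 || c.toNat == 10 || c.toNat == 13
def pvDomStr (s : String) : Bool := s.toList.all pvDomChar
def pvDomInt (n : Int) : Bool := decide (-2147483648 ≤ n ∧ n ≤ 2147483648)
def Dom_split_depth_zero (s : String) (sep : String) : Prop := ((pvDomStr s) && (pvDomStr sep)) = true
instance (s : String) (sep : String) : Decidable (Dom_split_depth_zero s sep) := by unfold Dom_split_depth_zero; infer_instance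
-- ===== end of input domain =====

-- B records depth-zero cut positions in one pass and slices the string along them in a
-- second pass, instead of A's single loop accumulating a 'current' character buffer;
-- objective: alternative decomposition (same cost).


-- the if/elif chain updating (brace_depth, bracket_depth) for one character (shared by both ports,
-- since both Pythons contain the identical elif chain)
def pvDepthStep (c : Char) (bd bk : Int) : Int × Int :=
  if c = '{' then (bd + 1, bk)
  else if c = '}' then (bd - 1, bk)
  else if c = '[' then (bd, bk + 1)
  else if c = ']' then (bd, bk - 1)
  else (bd, bk)

-- ===== PORT A =====
-- A's while loop: cs is the remaining suffix s[i:], cur is `current`, parts is `parts`.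
-- s[i:i+sep_len] == sep is cs.take sepL.length = sepL. The inner `if sepL = []` branch is a
-- totality guard only: there Python loops forever (excluded by Pre_).
def pvGoA (sepL : List Char) : List Char → Int → Int → List Char → List (List Char) → List (List Char)
  | [], _, _, cur, parts => if cur = [] then parts else parts ++ [cur]
  | c :: rest, bd, bk, cur, parts =>
    let p := pvDepthStep c bd bk
    if p.1 = 0 ∧ p.2 = 0 ∧ (c :: rest).take sepL.length = sepL then
      if hne : sepL = [] then parts ++ [cur]
      else pvGoA sepL ((c :: rest).drop sepL.length) p.1 p.2 [] (parts ++ [cur])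
    else pvGoA sepL rest p.1 p.2 (cur ++ [c]) parts
  termination_by cs => cs.length
  decreasing_by
    all_goals simp only [List.length_drop, List.length_cons]
    · have := List.length_pos_iff.mpr hne; omega
    · omega

def split_depth_zero (s : String) (sep : String) : List String :=
  (pvGoA sep.toList s.toList 0 0 [] []).map String.mk

-- ===== PORT B =====
-- B's first pass: collect the indices i of the depth-zero matches of sep (cuts).
-- The inner `if sepL = []` branch is a totality guard only (Python loops forever there).
def pvCutsB (sepL : List Char) : List Char → Nat → Int → Int → List Nat
  | [], _, _, _ => []
  | c :: rest, i, bd, bk =>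
    let p := pvDepthStep c bd bk
    if p.1 = 0 ∧ p.2 = 0 ∧ (c :: rest).take sepL.length = sepL then
      if hne : sepL = [] then []
      else i :: pvCutsB sepL ((c :: rest).drop sepL.length) (i + sepL.length) p.1 p.2
    else pvCutsB sepL rest (i + 1) p.1 p.2
  termination_by cs => cs.length
  decreasing_by
    all_goals simp only [List.length_drop, List.length_cons]
    · have := List.length_pos_iff.mpr hne; omega
    · omega

-- B's second pass: s[prev:c] for each cut c (here prev ≤ c always, so the Python slice is
-- exactly drop/take), then the tail s[prev:] if non-empty.
def pvSegsB (s : List Char) (sepLen : Nat) : Nat → List Nat → List (List Char)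
  | prev, [] => if s.drop prev = [] then [] else [s.drop prev]
  | prev, c :: cuts => (s.drop prev).take (c - prev) :: pvSegsB s sepLen (c + sepLen) cuts

def split_depth_zero_alt (s : String) (sep : String) : List String :=
  (pvSegsB s.toList sep.toList.length 0 (pvCutsB sep.toList s.toList 0 0 0)).map String.mk

-- ===== PRECONDITION & SPEC =====
-- Pre_ excludes exactly the inputs where Python's A loops forever (i stops advancing): sep = ""
-- together with some scan position at which both running depths are zero, stated as a
-- prefix-count condition on s (brace count = closing count and bracket count = closing count
-- on some non-empty prefix).
def Pre_split_depth_zero (s : String) (sep : String) : Prop :=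
  sep ≠ "" ∨ ∀ k < s.toList.length,
    ¬ ((s.toList.take (k + 1)).count '{' = (s.toList.take (k + 1)).count '}' ∧
       (s.toList.take (k + 1)).count '[' = (s.toList.take (k + 1)).count ']')
instance (s : String) (sep : String) : Decidable (Pre_split_depth_zero s sep) := by
  unfold Pre_split_depth_zero; infer_instance

def pvWitness_split_depth_zero : String × String := ("a{b,c},[d,e],f", ",")

def Spec_split_depth_zero (s : String) (sep : String) (out : List String) : Prop := out = split_depth_zero_alt s sep
instance (s : String) (sep : String) (out : List String) : Decidable (Spec_split_depth_zero s sep out) := by unfold Spec_split_depth_zero; infer_instance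

-- ===== CLAIM (what is proved, stated in full; the proofs are below) =====
def Claim_equal_split_depth_zero : Prop := ∀ (s : String) (sep : String), Dom_split_depth_zero s sep → Pre_split_depth_zero s sep → Spec_split_depth_zero s sep (split_depth_zero s sep)

-- ===== LEMMAS AND PROOFS =====

-- running depths after a prefix, as a fold of the elif chain
def pvFoldDepth (cs : List Char) (bd bk : Int) : Int × Int :=
  cs.foldl (fun p c => pvDepthStep c p.1 p.2) (bd, bk)

lemma pv_fold_count (cs : List Char) (bd bk : Int) :
    pvFoldDepth cs bd bk =
      (bd + cs.count '{' - cs.count '}', bk + cs.count '[' - cs.count ']') := by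
  induction cs generalizing bd bk with
  | nil => simp [pvFoldDepth]
  | cons c rest ih =>
    simp only [pvFoldDepth, List.foldl_cons] at *
    rw [ih]
    simp only [pvDepthStep, List.count_cons]
    split_ifs <;> simp_all <;> ring

-- with sep = "" and no depth-zero point ahead, A's loop never matches: it copies everything
lemma pv_goA_nomatch :
    ∀ (cs : List Char) (bd bk : Int) (cur : List Char) (parts : List (List Char)),
      (∀ k < cs.length, ¬ ((pvFoldDepth (cs.take (k + 1)) bd bk).1 = 0 ∧
                           (pvFoldDepth (cs.take (k + 1)) bd bk).2 = 0)) →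
      pvGoA [] cs bd bk cur parts =
        if cur ++ cs = [] then parts else parts ++ [cur ++ cs] := by
  intro cs
  induction cs with
  | nil => intro bd bk cur parts _; simp [pvGoA]
  | cons c rest ih =>
    intro bd bk cur parts hnz
    have h0 := hnz 0 (by simp)
    have hfold1 : pvFoldDepth ((c :: rest).take 1) bd bk = pvDepthStep c bd bk := by
      simp [pvFoldDepth]
    rw [hfold1] at h0
    simp only [pvGoA]
    rw [if_neg (by simpa using fun h1 h2 => h0 ⟨h1, h2⟩)]
    rw [ih (pvDepthStep c bd bk).1 (pvDepthStep c bd bk).2 (cur ++ [c]) parts ?_]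
    · simp
    · intro k hk
      have := hnz (k + 1) (by simp; omega)
      simpa [pvFoldDepth] using this

-- and B's first pass finds no cuts
lemma pv_cutsB_nomatch :
    ∀ (cs : List Char) (i : Nat) (bd bk : Int),
      (∀ k < cs.length, ¬ ((pvFoldDepth (cs.take (k + 1)) bd bk).1 = 0 ∧
                           (pvFoldDepth (cs.take (k + 1)) bd bk).2 = 0)) →
      pvCutsB [] cs i bd bk = [] := by
  intro cs
  induction cs with
  | nil => intro i bd bk _; simp [pvCutsB]
  | cons c rest ih =>
    intro i bd bk hnz
    have h0 := hnz 0 (by simp)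
    have hfold1 : pvFoldDepth ((c :: rest).take 1) bd bk = pvDepthStep c bd bk := by
      simp [pvFoldDepth]
    rw [hfold1] at h0
    simp only [pvCutsB]
    rw [if_neg (by simpa using fun h1 h2 => h0 ⟨h1, h2⟩)]
    apply ih
    intro k hk
    have := hnz (k + 1) (by simp; omega)
    simpa [pvFoldDepth] using this

lemma pv_drop_succ (s : List Char) (i : Nat) (c : Char) (rest : List Char)
    (h : s.drop i = c :: rest) : s.drop (i + 1) = rest := by
  have h2 : List.drop 1 (List.drop i s) = List.drop (i + 1) s := by rw [List.drop_drop]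
  rw [← h2, h]; rfl

lemma pv_cur_snoc (s : List Char) (prev i : Nat) (c : Char) (rest : List Char)
    (hpi : prev ≤ i) (h : s.drop i = c :: rest) :
    (s.drop prev).take (i - prev) ++ [c] = (s.drop prev).take (i + 1 - prev) := by
  have hlen : i < s.length := by
    by_contra hc
    rw [List.drop_eq_nil_of_le (by omega)] at h
    exact (List.cons_ne_nil _ _) h.symm
  have h1 : i + 1 - prev = (i - prev) + 1 := by omega
  rw [h1, List.take_add_one, List.getElem?_drop]
  have h3 : s[prev + (i - prev)]? = some c := by
    have hpi2 : prev + (i - prev) = i := by omega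
    rw [hpi2, ← Nat.add_zero i, ← List.getElem?_drop, h]; rfl
  rw [h3]; rfl

-- the heart: A's loop equals B's cut-then-slice decomposition, for every loop state.
lemma pv_main (sepL s : List Char) (hs : sepL ≠ []) :
    ∀ n i bd bk (prev : Nat) (parts : List (List Char)), prev ≤ i → s.length - i ≤ n →
      pvGoA sepL (s.drop i) bd bk ((s.drop prev).take (i - prev)) parts
        = parts ++ pvSegsB s sepL.length prev (pvCutsB sepL (s.drop i) i bd bk) := by
  intro n
  induction n with
  | zero =>
    intro i bd bk prev parts hpi hn
    have hd : s.drop i = [] := List.drop_eq_nil_of_le (by omega)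
    rw [hd]
    have hcur : (s.drop prev).take (i - prev) = s.drop prev := by
      apply List.take_of_length_le
      simp; omega
    rw [hcur]
    simp only [pvGoA, pvCutsB, pvSegsB]
    split_ifs <;> simp_all
  | succ n ih =>
    intro i bd bk prev parts hpi hn
    cases hd : s.drop i with
    | nil =>
      have hlen : s.length ≤ i := by
        by_contra hc
        have : s.drop i ≠ [] := by
          apply List.ne_nil_of_length_pos
          simp; omega
        exact this hd
      have hcur : (s.drop prev).take (i - prev) = s.drop prev := by
        apply List.take_of_length_le
        simp; omega
      rw [hcur]
      simp only [pvGoA, pvCutsB, pvSegsB]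
      split_ifs <;> simp_all
    | cons c rest =>
      have hlen : i < s.length := by
        by_contra hc
        rw [List.drop_eq_nil_of_le (by omega)] at hd
        exact (List.cons_ne_nil _ _) hd.symm
      simp only [pvGoA, pvCutsB]
      set p := pvDepthStep c bd bk with hp
      by_cases hmatch : p.1 = 0 ∧ p.2 = 0 ∧ (c :: rest).take sepL.length = sepL
      · rw [if_pos hmatch, if_pos hmatch, dif_neg hs, dif_neg hs]
        have hdrop : (c :: rest).drop sepL.length = s.drop (i + sepL.length) := by
          rw [← hd, List.drop_drop]
        have hL1 : 1 ≤ sepL.length := List.length_pos_iff.mpr hs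
        rw [hdrop]
        have := ih (i + sepL.length) p.1 p.2 (i + sepL.length) (parts ++ [(s.drop prev).take (i - prev)])
          (le_refl _) (by omega)
        simp only [Nat.sub_self, List.take_zero] at this
        rw [this]
        simp [pvSegsB]
      · rw [if_neg hmatch, if_neg hmatch]
        have hrest : rest = s.drop (i + 1) := (pv_drop_succ s i c rest hd).symm
        rw [hrest, pv_cur_snoc s prev i c rest hpi hd]
        exact ih (i + 1) p.1 p.2 prev parts (by omega) (by omega)

-- ===== VERDICT (by name: the statement is the Claim_ definition above) =====
theorem split_depth_zero_spec : Claim_equal_split_depth_zero := by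
  intro s sep _hdom hpre
  unfold Spec_split_depth_zero split_depth_zero split_depth_zero_alt
  by_cases hsep : sep = ""
  · -- empty separator: Pre_ guarantees no depth-zero point, so neither side ever matches
    have hnz : ∀ k < s.toList.length,
        ¬ ((pvFoldDepth (s.toList.take (k + 1)) 0 0).1 = 0 ∧
           (pvFoldDepth (s.toList.take (k + 1)) 0 0).2 = 0) := by
      rcases hpre with h | h
      · exact absurd hsep h
      · intro k hk hz
        rcases hz with ⟨h1, h2⟩
        rw [pv_fold_count] at h1 h2
        simp only at h1 h2
        exact h k hk ⟨by omega, by omega⟩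
    have hsepL : sep.toList = [] := by simp [hsep]
    rw [hsepL, pv_goA_nomatch s.toList 0 0 [] [] hnz, pv_cutsB_nomatch s.toList 0 0 0 hnz]
    simp [pvSegsB]
  · have hs : sep.toList ≠ [] := by
      intro h
      exact hsep (by rwa [← String.toList_eq_nil_iff])
    have := pv_main sep.toList s.toList hs s.toList.length 0 0 0 0 [] (le_refl 0) (by omega)
    simp only [List.drop_zero, Nat.sub_self, List.take_zero, List.nil_append] at this
    rw [this]
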